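-- pv_equiv track=rewrite | github.com/carelribaltchenko/SAE_2 | histoire2foot.py | plus_gros_scores
-- ===== SOURCE A (Python) =====
-- def plus_gros_scores(liste_matchs):
--     """retourne la liste des matchs pour lesquels l'écart de buts entre le vainqueur et le perdant est le plus grand
--
--     Args:
--         liste_matchs (list): une liste de matchs
--
--     Returns:
--         list: la liste des matchs avec le plus grand écart entre vainqueur et perdant
--     """
--     lf=[]
--     valeur=0
--     for matchs in liste_matchs:
--         if abs(matchs[3]-matchs[4]) == valeur:
--             lf.append(matchs)
--         elif abs(matchs[3]-matchs[4]) > valeur: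
--             lf.clear()
--             valeur = abs(matchs[3]-matchs[4])
--             lf.append(matchs)
--     return lf
-- ===== SOURCE B (Python) =====
-- def plus_gros_scores(liste_matchs):
--     """retourne la liste des matchs pour lesquels l'écart de buts entre le vainqueur et le perdant est le plus grand"""
--     if not liste_matchs:
--         return []
--     max_ecart = max(abs(m[3] - m[4]) for m in liste_matchs)
--     return [m for m in liste_matchs if abs(m[3] - m[4]) == max_ecart]
-- ===== Notes on version B (the rewrite author's own statement) =====
-- stated objective: simpler
-- what changed: Replaces the fused track-the-best-and-collect loop (with list.clear on a new maximum) by two separate passes: compute the maximum goal difference, then filter the matches attaining it.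
import Mathlib
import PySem

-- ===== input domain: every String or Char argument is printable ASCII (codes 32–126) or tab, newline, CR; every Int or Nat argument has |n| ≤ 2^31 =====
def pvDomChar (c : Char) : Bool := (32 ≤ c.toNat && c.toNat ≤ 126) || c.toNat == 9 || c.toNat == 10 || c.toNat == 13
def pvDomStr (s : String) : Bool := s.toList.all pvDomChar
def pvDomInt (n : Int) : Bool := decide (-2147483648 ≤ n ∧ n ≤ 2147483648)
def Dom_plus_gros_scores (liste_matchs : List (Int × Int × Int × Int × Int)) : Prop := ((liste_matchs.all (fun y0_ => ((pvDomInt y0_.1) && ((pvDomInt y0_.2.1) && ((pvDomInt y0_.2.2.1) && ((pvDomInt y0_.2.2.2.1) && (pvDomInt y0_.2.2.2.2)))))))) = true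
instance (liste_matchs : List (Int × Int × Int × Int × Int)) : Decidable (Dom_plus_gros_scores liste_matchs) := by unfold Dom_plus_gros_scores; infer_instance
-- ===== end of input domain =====

-- B replaces A's fused track-and-collect loop by two passes (compute the max goal
-- difference, then filter the matches attaining it); objective: simpler. Return values equal.

-- ===== PORT A =====
-- single pass keeping (lf, valeur); '.clear(); append' on a strictly larger écart
def plus_gros_scores (liste_matchs : List (Int × Int × Int × Int × Int)) : List (Int × Int × Int × Int × Int) :=
  (liste_matchs.foldl
    (fun (st : List (Int × Int × Int × Int × Int) × Int) matchs =>
      if |matchs.2.2.2.1 - matchs.2.2.2.2| = st.2 then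
        (st.1 ++ [matchs], st.2)
      else if |matchs.2.2.2.1 - matchs.2.2.2.2| > st.2 then
        ([matchs], |matchs.2.2.2.1 - matchs.2.2.2.2|)
      else st)
    ([], 0)).1

-- ===== PORT B =====
-- two passes: max over the écarts (none = empty list → []), then a filter
def plus_gros_scores_alt (liste_matchs : List (Int × Int × Int × Int × Int)) : List (Int × Int × Int × Int × Int) :=
  match PySem.List.max? (liste_matchs.map (fun m => |m.2.2.2.1 - m.2.2.2.2|)) (fun y => y) with
  | none => []
  | some max_ecart => liste_matchs.filter (fun m => |m.2.2.2.1 - m.2.2.2.2| == max_ecart)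

-- ===== PRECONDITION & SPEC =====
def Spec_plus_gros_scores (liste_matchs : List (Int × Int × Int × Int × Int)) (out : List (Int × Int × Int × Int × Int)) : Prop := out = plus_gros_scores_alt liste_matchs
instance (liste_matchs : List (Int × Int × Int × Int × Int)) (out : List (Int × Int × Int × Int × Int)) : Decidable (Spec_plus_gros_scores liste_matchs out) := by unfold Spec_plus_gros_scores; infer_instance

-- ===== CLAIM (what is proved, stated in full; the proofs are below) =====
def Claim_equal_plus_gros_scores : Prop := ∀ (liste_matchs : List (Int × Int × Int × Int × Int)), Dom_plus_gros_scores liste_matchs → Spec_plus_gros_scores liste_matchs (plus_gros_scores liste_matchs)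

-- ===== LEMMAS AND PROOFS =====

-- the écart of a match (proof-side abbreviation)
def pgsF (m : Int × Int × Int × Int × Int) : Int := |m.2.2.2.1 - m.2.2.2.2|

-- the running maximum A maintains
def pgsMax (l : List (Int × Int × Int × Int × Int)) (v : Int) : Int :=
  l.foldl (fun a x => max a (pgsF x)) v

lemma pgsMax_ge (l : List (Int × Int × Int × Int × Int)) (v : Int) : v ≤ pgsMax l v :=
  (PySem.List.le_foldl_max_int l pgsF v).1

-- A's loop from an arbitrary state, characterised: keep lf only if the max does not move,
-- and append all matches attaining the final max
lemma pgs_loop (l : List (Int × Int × Int × Int × Int)) (lf : List (Int × Int × Int × Int × Int)) (v : Int) :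
    (l.foldl
      (fun (st : List (Int × Int × Int × Int × Int) × Int) matchs =>
        if |matchs.2.2.2.1 - matchs.2.2.2.2| = st.2 then
          (st.1 ++ [matchs], st.2)
        else if |matchs.2.2.2.1 - matchs.2.2.2.2| > st.2 then
          ([matchs], |matchs.2.2.2.1 - matchs.2.2.2.2|)
        else st)
      (lf, v)).1
    = (if pgsMax l v = v then lf else []) ++ l.filter (fun m => pgsF m == pgsMax l v) := by
  induction l generalizing lf v with
  | nil => simp [pgsMax]
  | cons x t ih =>
    have hmax : pgsMax (x :: t) v = pgsMax t (max v (pgsF x)) := by simp [pgsMax]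
    by_cases h1 : pgsF x = v
    · have hm : max v (pgsF x) = v := by omega
      simp only [List.foldl_cons, List.filter_cons]
      rw [show (if |x.2.2.2.1 - x.2.2.2.2| = v then (lf ++ [x], v)
            else if |x.2.2.2.1 - x.2.2.2.2| > v then ([x], |x.2.2.2.1 - x.2.2.2.2|)
            else (lf, v)) = (lf ++ [x], v) by simp [show |x.2.2.2.1 - x.2.2.2.2| = v from h1]]
      rw [ih, hmax, hm]
      by_cases h2 : pgsMax t v = v
      · simp [h1, h2]
      · have : ¬ (pgsF x == pgsMax t v) = true := by
          simp only [beq_iff_eq]; omega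
        simp [h2, this]
    · by_cases h2 : pgsF x > v
      · have hm : max v (pgsF x) = pgsF x := by omega
        have hge : pgsF x ≤ pgsMax t (pgsF x) := pgsMax_ge t (pgsF x)
        simp only [List.foldl_cons, List.filter_cons]
        rw [show (if |x.2.2.2.1 - x.2.2.2.2| = v then (lf ++ [x], v)
              else if |x.2.2.2.1 - x.2.2.2.2| > v then ([x], |x.2.2.2.1 - x.2.2.2.2|)
              else (lf, v)) = ([x], pgsF x) by
            simp [pgsF, show ¬ |x.2.2.2.1 - x.2.2.2.2| = v from h1,
              show |x.2.2.2.1 - x.2.2.2.2| > v from h2]]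
        rw [ih, hmax, hm]
        have hne : ¬ pgsMax t (pgsF x) = v := by omega
        simp only [hne, if_false, List.nil_append]
        by_cases h3 : pgsMax t (pgsF x) = pgsF x
        · simp [h3]
        · have : ¬ (pgsF x == pgsMax t (pgsF x)) = true := by
            simp only [beq_iff_eq]; omega
          simp [h3, this]
      · have hlt : pgsF x < v := by omega
        have hm : max v (pgsF x) = v := by omega
        have hge : v ≤ pgsMax t v := pgsMax_ge t v
        simp only [List.foldl_cons, List.filter_cons]
        rw [show (if |x.2.2.2.1 - x.2.2.2.2| = v then (lf ++ [x], v)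
              else if |x.2.2.2.1 - x.2.2.2.2| > v then ([x], |x.2.2.2.1 - x.2.2.2.2|)
              else (lf, v)) = (lf, v) by
            simp [show ¬ |x.2.2.2.1 - x.2.2.2.2| = v from h1,
              show ¬ |x.2.2.2.1 - x.2.2.2.2| > v from h2]]
        rw [ih, hmax, hm]
        have : ¬ (pgsF x == pgsMax t v) = true := by
          simp only [beq_iff_eq]; omega
        simp [this]

theorem plus_gros_scores_spec : Claim_equal_plus_gros_scores := by
  intro l _
  unfold Spec_plus_gros_scores plus_gros_scores plus_gros_scores_alt
  cases l with
  | nil => simp [PySem.List.max?]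
  | cons x t =>
    have habs : (0 : Int) ≤ pgsF x := abs_nonneg _
    have hmap : (x :: t).map (fun m => |m.2.2.2.1 - m.2.2.2.2|) = pgsF x :: t.map pgsF := by
      simp [pgsF]
    rw [hmap, PySem.List.max?_id_cons]
    have hfold : (t.map pgsF).foldl max (pgsF x) = pgsMax (x :: t) 0 := by
      simp [pgsMax, List.foldl_map, show max (0 : Int) (pgsF x) = pgsF x by omega]
    rw [pgs_loop (x :: t) [] 0, hfold]
    simp only [pgsF]
    split <;> simp
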